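-- pv_equiv track=rewrite | github.com/Nathaniel-Reeves/ProlifixManager | database/db.py | convertDictstoTuples
-- ===== SOURCE A (Python) =====
-- def convertDictstoTuples(data=None):
-- 	if len(data) <= 0:
-- 		return None
-- 	if data is None:
-- 		return None
--
-- 	columns = tuple(data[0])
-- 	tupleData = []
-- 	for i in range(len(data)):
-- 		# check columns against the first set
-- 		if columns == tuple(data[i]):
-- 			tupleData.append(tuple(data[i].values()))
-- 		else:
-- 			return None
--
-- 	return (columns, tupleData)
-- ===== SOURCE B (Python) =====
-- def convertDictstoTuples(data=None):
--     if len(data) <= 0: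
--         return None
--     if data is None:
--         return None
--     # collapse all key tuples into a set: valid iff exactly one distinct key tuple
--     if len({tuple(d) for d in data}) != 1:
--         return None
--     return (tuple(data[0]), [tuple(d.values()) for d in data])
-- ===== Notes on version B (the rewrite author's own statement) =====
-- stated objective: alternative
-- what changed: A's fused loop comparing every dict's key tuple against the first and appending value tuples is replaced by a hash-set cardinality check (the set of all key tuples must be a singleton) followed by a comprehension building the value tuples.
import Mathlib
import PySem

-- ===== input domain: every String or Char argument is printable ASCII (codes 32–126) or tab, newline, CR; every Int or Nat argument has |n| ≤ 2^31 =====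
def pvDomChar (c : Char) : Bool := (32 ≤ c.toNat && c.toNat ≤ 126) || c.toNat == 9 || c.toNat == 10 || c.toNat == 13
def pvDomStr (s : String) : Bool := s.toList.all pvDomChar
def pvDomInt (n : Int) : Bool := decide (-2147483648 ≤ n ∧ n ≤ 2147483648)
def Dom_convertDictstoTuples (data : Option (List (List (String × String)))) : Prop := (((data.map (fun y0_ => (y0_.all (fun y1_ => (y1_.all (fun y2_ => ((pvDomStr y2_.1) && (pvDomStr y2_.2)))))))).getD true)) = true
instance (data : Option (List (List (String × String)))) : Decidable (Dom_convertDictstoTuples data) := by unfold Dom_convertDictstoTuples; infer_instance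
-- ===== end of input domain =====

-- B replaces A's fused compare-against-first-and-append loop by a set-cardinality check
-- (the set of all key tuples must be a singleton) followed by a comprehension (return value only).

-- ===== PORT A =====
-- A's for-loop over range(len(data)): checks each dict's key tuple against the first,
-- appending its value tuple, short-circuiting to None on the first mismatch.
def pvALoop (cols : List String) : List (List (String × String)) → Option (List (List String))
  | [] => some []
  | d :: rest =>
    if cols = d.map Prod.fst then
      (pvALoop cols rest).map (fun t => d.map Prod.snd :: t)
    else
      none

def convertDictstoTuples (data : Option (List (List (String × String)))) : Option (List String × List (List String)) :=
  match data with
  | none => none  -- Python raises TypeError on len(None); excluded by Pre_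
  | some ds =>
    if ds.length ≤ 0 then none
    else
      match ds with
      | [] => none
      | d0 :: _ =>
        let cols := d0.map Prod.fst
        (pvALoop cols ds).map (fun t => (cols, t))

-- ===== PORT B =====
def convertDictstoTuples_alt (data : Option (List (List (String × String)))) : Option (List String × List (List String)) :=
  match data with
  | none => none  -- Python raises TypeError on len(None); excluded by Pre_
  | some ds =>
    if ds.length ≤ 0 then none
    else
      -- {tuple(d) for d in data}
      let keysets : PySem.Set (List String) := PySem.Set.ofList (ds.map (fun d => d.map Prod.fst))
      if PySem.Set.len keysets ≠ 1 then none
      else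
        match ds with
        | [] => none
        | d0 :: _ => some (d0.map Prod.fst, ds.map (fun d => d.map Prod.snd))

-- ===== PRECONDITION & SPEC =====
-- Pre_ excludes only data = None, where the Python A (and B) raise TypeError on len(None).
def Pre_convertDictstoTuples (data : Option (List (List (String × String)))) : Prop := data ≠ none
instance (data : Option (List (List (String × String)))) : Decidable (Pre_convertDictstoTuples data) := by unfold Pre_convertDictstoTuples; infer_instance
def pvWitness_convertDictstoTuples : (Option (List (List (String × String)))) := some [[("a", "1"), ("b", "2")], [("a", "3"), ("b", "4")]]

def Spec_convertDictstoTuples (data : Option (List (List (String × String)))) (out : Option (List String × List (List String))) : Prop := out = convertDictstoTuples_alt data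
instance (data : Option (List (List (String × String)))) (out : Option (List String × List (List String))) : Decidable (Spec_convertDictstoTuples data out) := by unfold Spec_convertDictstoTuples; infer_instance

-- ===== CLAIM (what is proved, stated in full; the proofs are below) =====
def Claim_equal_convertDictstoTuples : Prop := ∀ (data : Option (List (List (String × String)))), Dom_convertDictstoTuples data → Pre_convertDictstoTuples data → Spec_convertDictstoTuples data (convertDictstoTuples data)

-- ===== LEMMAS AND PROOFS =====
-- A's loop returns the value tuples iff every key tuple is cols, else none.
theorem pvALoop_eq (cols : List String) (ds : List (List (String × String))) :
    pvALoop cols ds =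
      if ∀ d ∈ ds, d.map Prod.fst = cols then some (ds.map (fun d => d.map Prod.snd))
      else none := by
  induction ds with
  | nil => simp [pvALoop]
  | cons d rest ih =>
    simp only [pvALoop, ih]
    by_cases h : cols = d.map Prod.fst
    · subst h
      by_cases h2 : ∀ x ∈ rest, x.map Prod.fst = d.map Prod.fst <;> simp_all
    · simp [h, Ne.symm h]

-- the set of key tuples of d0 :: rest is a singleton iff every key tuple equals d0's.
theorem ofList_len_one (x : List String) (l : List (List String)) :
    ((PySem.Set.ofList (x :: l)).length = 1) ↔ ∀ y ∈ l, y = x := by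
  rw [PySem.Set.ofList_cons]
  simp only [List.length_cons]
  constructor
  · intro h y hy
    have h0 : PySem.Set.discard (PySem.Set.ofList l) x = [] := by
      cases heq : PySem.Set.discard (PySem.Set.ofList l) x with
      | nil => rfl
      | cons a b => rw [heq] at h; simp at h
    by_contra hne
    have : y ∈ PySem.Set.discard (PySem.Set.ofList l) x := by
      rw [PySem.Set.mem_discard]
      exact ⟨(PySem.Set.mem_ofList _ _).mpr hy, hne⟩
    rw [h0] at this; exact absurd this (List.not_mem_nil)
  · intro h
    have h0 : PySem.Set.discard (PySem.Set.ofList l) x = [] := by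
      rw [List.eq_nil_iff_forall_not_mem]
      intro y hy
      rw [PySem.Set.mem_discard, PySem.Set.mem_ofList] at hy
      exact hy.2 (h y hy.1)
    rw [h0]; rfl

-- ===== VERDICT (by name: the statement is the Claim_ definition above) =====
theorem convertDictstoTuples_spec : Claim_equal_convertDictstoTuples := by
  intro data _ hpre
  unfold Spec_convertDictstoTuples convertDictstoTuples convertDictstoTuples_alt
  match data with
  | none => exact absurd rfl hpre
  | some [] => rfl
  | some (d0 :: rest) =>
    simp only [pvALoop_eq]
    have hset := ofList_len_one (d0.map Prod.fst) (rest.map (fun d => d.map Prod.fst))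
    by_cases h : ∀ d ∈ rest, d.map Prod.fst = d0.map Prod.fst
    · have hlen : (PySem.Set.ofList ((d0 :: rest).map (fun d => d.map Prod.fst))).length = 1 := by
        rw [List.map_cons]; rw [hset]; intro y hy
        simp only [List.mem_map] at hy
        obtain ⟨d, hd, rfl⟩ := hy; exact h d hd
      simp only [List.map_cons] at hlen
      simp [PySem.Set.len, hlen]
      exact h
    · have hlen : ¬ (PySem.Set.ofList ((d0 :: rest).map (fun d => d.map Prod.fst))).length = 1 := by
        rw [List.map_cons, hset]
        intro hall
        exact h (fun d hd => hall _ (List.mem_map_of_mem hd))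
      simp only [List.map_cons] at hlen
      simp [PySem.Set.len, hlen, h]
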